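-- pv_equiv track=rewrite | github.com/seagullQ77/nfd-autotest | codewars/added_char.py | added_char
-- ===== SOURCE A (Python) =====
-- def added_char(s1, s2):
--     for i in s2:
--         flag = 0
--         for j in s1:
--             if i == j:
--                 s1 = s1.replace(j, '',1)
--                 flag = 1
--                 break
--         if flag == 0:
--             return i
--             break
-- ===== SOURCE B (Python) =====
-- def added_char(s1, s2):
--     counts = {}
--     for c in s1:
--         counts[c] = counts.get(c, 0) + 1
--     for c in s2:
--         if counts.get(c, 0) == 0:
--             return c
--         counts[c] = counts[c] - 1
-- ===== Notes on version B (the rewrite author's own statement) =====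
-- stated objective: faster
-- what changed: B builds a character-count dictionary from s1 once and makes a single pass over s2 decrementing counts, instead of rescanning and rebuilding s1 with str.replace for every character of s2.
import Mathlib
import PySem

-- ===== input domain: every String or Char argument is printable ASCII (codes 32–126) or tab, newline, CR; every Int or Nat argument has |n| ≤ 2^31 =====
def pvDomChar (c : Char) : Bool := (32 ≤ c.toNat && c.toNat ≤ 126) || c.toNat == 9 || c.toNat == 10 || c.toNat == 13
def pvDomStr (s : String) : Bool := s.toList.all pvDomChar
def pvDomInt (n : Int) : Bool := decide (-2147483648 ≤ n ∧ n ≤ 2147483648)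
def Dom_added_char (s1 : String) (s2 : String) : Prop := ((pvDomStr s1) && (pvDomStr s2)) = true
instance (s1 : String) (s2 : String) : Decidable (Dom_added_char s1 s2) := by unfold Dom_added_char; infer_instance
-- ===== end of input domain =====

-- B replaces A's per-character rescan of s1 (with str.replace rebuilding s1) by a
-- count dictionary built once from s1 and a single decrementing pass over s2.

-- ===== PORT A =====
-- s1.replace(j, '', 1): remove the first occurrence of j
def pvReplaceOnce (s : List Char) (j : Char) : List Char :=
  match s with
  | [] => []
  | x :: rest => if x == j then rest else x :: pvReplaceOnce rest j

-- the inner 'for j in s1' loop: flag = 1 iff some j in s1 equals i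
def pvFind (i : Char) : List Char → Bool
  | [] => false
  | j :: rest => if i == j then true else pvFind i rest

-- the outer 'for i in s2' loop, carrying the mutated s1
def pvALoop : List Char → List Char → Option String
  | [], _ => none
  | i :: rest, s1 =>
      if pvFind i s1 then pvALoop rest (pvReplaceOnce s1 i)
      else some (String.ofList [i])

def added_char (s1 : String) (s2 : String) : Option String :=
  pvALoop s2.toList s1.toList

-- ===== PORT B =====
-- counts = {}; for c in s1: counts[c] = counts.get(c, 0) + 1
def pvCounts (s1 : List Char) : PySem.Dict Char Int :=
  s1.foldl (fun d c => d.insert c (d.getD c 0 + 1)) PySem.Dict.empty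

-- for c in s2: if counts.get(c,0) == 0: return c; counts[c] = counts[c] - 1
def pvBLoop : List Char → PySem.Dict Char Int → Option String
  | [], _ => none
  | c :: rest, d =>
      if d.getD c 0 == 0 then some (String.ofList [c])
      else pvBLoop rest (d.insert c (d.getD c 0 - 1))

def added_char_alt (s1 : String) (s2 : String) : Option String :=
  pvBLoop s2.toList (pvCounts s1.toList)

-- ===== PRECONDITION & SPEC =====
def Spec_added_char (s1 : String) (s2 : String) (out : Option String) : Prop := out = added_char_alt s1 s2
instance (s1 : String) (s2 : String) (out : Option String) : Decidable (Spec_added_char s1 s2 out) := by unfold Spec_added_char; infer_instance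

-- ===== CLAIM (what is proved, stated in full; the proofs are below) =====
def Claim_equal_added_char : Prop := ∀ (s1 : String) (s2 : String), Dom_added_char s1 s2 → Spec_added_char s1 s2 (added_char s1 s2)

-- ===== LEMMAS AND PROOFS =====

theorem pvReplaceOnce_eq_erase (s : List Char) (j : Char) : pvReplaceOnce s j = s.erase j := by
  induction s with
  | nil => rfl
  | cons x rest ih => simp [pvReplaceOnce, List.erase_cons, ih]

theorem pvFind_eq_mem (i : Char) (s : List Char) : pvFind i s = true ↔ i ∈ s := by
  induction s with
  | nil => simp [pvFind]
  | cons j rest ih =>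
      simp only [pvFind, List.mem_cons]
      by_cases h : i = j
      · simp [h]
      · simp [h, ih, beq_iff_eq]

theorem pvLoop_eq (s2 : List Char) : ∀ (s1 : List Char) (d : PySem.Dict Char Int),
    (∀ k, d.getD k 0 = (s1.count k : Int)) → pvALoop s2 s1 = pvBLoop s2 d := by
  induction s2 with
  | nil => intro s1 d _; rfl
  | cons i rest ih =>
      intro s1 d hd
      simp only [pvALoop, pvBLoop, hd i]
      by_cases hm : i ∈ s1
      · have hcount : 1 ≤ s1.count i := List.one_le_count_iff.mpr hm
        have hne : ((s1.count i : Int) == 0) = false := by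
          simp only [beq_eq_false_iff_ne, ne_eq]
          omega
        rw [if_pos ((pvFind_eq_mem i s1).mpr hm), hne, if_neg (by simp)]
        rw [pvReplaceOnce_eq_erase]
        apply ih
        intro k
        rw [PySem.Dict.getD_insert, hd k]
        by_cases hk : k = i
        · subst hk
          rw [if_pos rfl, List.count_erase_self]
          push_cast [hcount]
          omega
        · rw [if_neg hk, List.count_erase_of_ne hk]
      · have : s1.count i = 0 := List.count_eq_zero.mpr hm
        rw [if_neg (by simp [pvFind_eq_mem, hm]), this]
        simp
  
theorem counts_getD (s1 : List Char) (k : Char) : (pvCounts s1).getD k 0 = (s1.count k : Int) := by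
  unfold pvCounts
  rw [PySem.Dict.getD_foldl_insert_add_one, PySem.Dict.getD_empty]
  omega

-- ===== VERDICT (by name: the statement is the Claim_ definition above) =====
theorem added_char_spec : Claim_equal_added_char := by
  intro s1 s2 _
  unfold Spec_added_char added_char added_char_alt
  exact pvLoop_eq s2.toList s1.toList (pvCounts s1.toList) (fun k => counts_getD s1.toList k)
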